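-- pv_equiv track=rewrite | github.com/CelestiaProject/Celestia | src/celengine/genmarkers.py | RearrangeForLines
-- ===== SOURCE A (Python) =====
-- def RearrangeForLines(ary, count):
--     out = []
--     i = 0
--     while i < count:
--         j = i * 2
--         out.append(ary[j])
--         out.append(ary[j+1])
--         k = ((i + 1) % count) * 2
--         out.append(ary[k])
--         out.append(ary[k+1])
--         i+=1
--     return out
-- ===== SOURCE B (Python) =====
-- def RearrangeForLines(ary, count):
--     doubled = []
--     for i in range(count):
--         doubled += [ary[2 * i], ary[2 * i + 1]] * 2
--     return doubled[2:] + doubled[:2]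
-- ===== Notes on version B (the rewrite author's own statement) =====
-- stated objective: alternative
-- what changed: B never computes a successor index: it duplicates each coordinate pair into one doubled stream and then rotates the whole stream left by one point with slicing, instead of A's per-iteration (i+1)%count successor indexing.
import Mathlib
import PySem

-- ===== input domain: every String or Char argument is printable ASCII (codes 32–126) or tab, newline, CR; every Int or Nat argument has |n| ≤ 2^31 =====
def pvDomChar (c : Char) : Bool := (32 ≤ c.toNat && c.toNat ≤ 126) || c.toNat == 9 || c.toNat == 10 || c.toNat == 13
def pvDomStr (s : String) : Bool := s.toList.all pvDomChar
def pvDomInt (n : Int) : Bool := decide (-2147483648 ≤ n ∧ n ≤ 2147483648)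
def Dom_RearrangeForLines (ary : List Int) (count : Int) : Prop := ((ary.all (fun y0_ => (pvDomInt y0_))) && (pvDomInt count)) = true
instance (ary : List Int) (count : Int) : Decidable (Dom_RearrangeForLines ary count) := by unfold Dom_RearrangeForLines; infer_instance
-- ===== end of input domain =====

-- B duplicates each coordinate pair into one doubled stream and rotates it left by one point
-- with slicing, removing A's (i+1)%count successor indexing (alternative decomposition, same cost).

-- ===== PORT A =====
-- while i < count: append ary[i*2], ary[i*2+1], ary[k], ary[k+1] with k = ((i+1) % count) * 2
def RearrangeForLines (ary : List Int) (count : Int) : List Int :=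
  (PySem.List.pyRange 0 count 1).foldl (fun out i =>
    let j := i * 2
    let k := (PySem.Int.mod (i + 1) count) * 2
    out ++ [PySem.List.pyGetD ary j 0, PySem.List.pyGetD ary (j + 1) 0,
            PySem.List.pyGetD ary k 0, PySem.List.pyGetD ary (k + 1) 0]) []

-- ===== PORT B =====
-- doubled += [ary[2*i], ary[2*i+1]] * 2 for each i in range(count); then doubled[2:] + doubled[:2]
def RearrangeForLines_alt (ary : List Int) (count : Int) : List Int :=
  let doubled := (PySem.List.pyRange 0 count 1).foldl (fun d i =>
    d ++ ([PySem.List.pyGetD ary (2 * i) 0, PySem.List.pyGetD ary (2 * i + 1) 0] ++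
          [PySem.List.pyGetD ary (2 * i) 0, PySem.List.pyGetD ary (2 * i + 1) 0])) []
  PySem.List.slice doubled (some 2) none ++ PySem.List.slice doubled none (some 2)

-- ===== PRECONDITION & SPEC =====
-- Pre_ excludes exactly the inputs where Python A raises IndexError: a positive count
-- needing indices up to 2*count-1 beyond ary's length.
def Pre_RearrangeForLines (ary : List Int) (count : Int) : Prop :=
  count ≤ 0 ∨ 2 * count ≤ (ary.length : Int)
instance (ary : List Int) (count : Int) : Decidable (Pre_RearrangeForLines ary count) := by
  unfold Pre_RearrangeForLines; infer_instance

def pvWitness_RearrangeForLines : List Int × Int := ([3, 4, 5, 6, 7, 8], 3)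

def Spec_RearrangeForLines (ary : List Int) (count : Int) (out : List Int) : Prop := out = RearrangeForLines_alt ary count
instance (ary : List Int) (count : Int) (out : List Int) : Decidable (Spec_RearrangeForLines ary count out) := by unfold Spec_RearrangeForLines; infer_instance

-- ===== CLAIM (what is proved, stated in full; the proofs are below) =====
def Claim_equal_RearrangeForLines : Prop := ∀ (ary : List Int) (count : Int), Dom_RearrangeForLines ary count → Pre_RearrangeForLines ary count → Spec_RearrangeForLines ary count (RearrangeForLines ary count)

-- ===== LEMMAS AND PROOFS =====

-- flattening the head-with-successor pairing: pairs (P,r0),(r0,r1),…,(r_last,Z) flatten to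
-- P ++ (each middle element doubled) ++ Z
theorem flat_zip_succ {α : Type} (rest : List (List α)) (P Z : List α) :
    ((P :: rest).zip (rest ++ [Z])).flatMap (fun pq => pq.1 ++ pq.2)
      = P ++ rest.flatMap (fun l => l ++ l) ++ Z := by
  induction rest generalizing P with
  | nil => simp
  | cons Q rs ih =>
    simp only [List.cons_append, List.zip_cons_cons, List.flatMap_cons] at *
    rw [ih Q]
    simp [List.append_assoc]

-- rotating the doubled stream by one point equals the successor pairing
theorem dup_rotate_eq_zip {α : Type} (pts : List (List α)) (hne : pts ≠ [])
    (hlen : ∀ l ∈ pts, l.length = 2) :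
    (pts.flatMap (fun l => l ++ l)).drop 2 ++ (pts.flatMap (fun l => l ++ l)).take 2
      = (pts.zip (pts.drop 1 ++ pts.take 1)).flatMap (fun pq => pq.1 ++ pq.2) := by
  cases pts with
  | nil => exact absurd rfl hne
  | cons P rest =>
    have hP : P.length = 2 := hlen P (by simp)
    simp only [List.flatMap_cons, List.drop_succ_cons, List.drop_zero, List.take_succ_cons,
      List.take_zero]
    rw [flat_zip_succ]
    have h2 : (2 : Nat) = P.length := hP.symm
    rw [List.append_assoc P P, h2, List.drop_left, List.take_left]

-- rotating a range-indexed table by one step is indexing at (i+1) % n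
theorem rot_map_range {α : Type} (n : Nat) (P : Nat → α) :
    ((List.range n).map P).drop 1 ++ ((List.range n).map P).take 1
      = (List.range n).map (fun i => P ((i + 1) % n)) := by
  cases n with
  | zero => simp
  | succ m =>
    conv_rhs => rw [List.range_succ]
    conv_lhs => rw [List.range_succ_eq_map]
    simp only [List.map_cons, List.drop_succ_cons, List.drop_zero, List.take_succ_cons,
      List.take_zero, List.map_append, List.map_map, List.map_cons, List.map_nil]
    congr 1
    · apply List.map_congr_left
      intro i hi
      simp only [Function.comp_apply]
      have : (i + 1) % (m + 1) = i + 1 := Nat.mod_eq_of_lt (by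
        have := List.mem_range.mp hi; omega)
      simp [this]
    · simp [Nat.mod_self]

theorem slice_from_two {α : Type} (xs : List α) :
    PySem.List.slice xs (some 2) none = xs.drop 2 := by
  simpa using PySem.List.slice_from_natCast (xs := xs) (a := 2)

theorem slice_to_two {α : Type} (xs : List α) :
    PySem.List.slice xs none (some 2) = xs.take 2 := by
  simpa using PySem.List.slice_to_natCast (xs := xs) (b := 2)

theorem RearrangeForLines_spec : Claim_equal_RearrangeForLines := by
  intro ary count _ _
  unfold Spec_RearrangeForLines RearrangeForLines RearrangeForLines_alt
  dsimp only
  rcases (by omega : count ≤ 0 ∨ 0 < count) with hle | hpos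
  · have h0 : PySem.List.pyRange 0 count 1 = [] := by
      simp [PySem.List.pyRange]; omega
    simp [h0, PySem.List.slice]
  · obtain ⟨n, rfl⟩ : ∃ n : Nat, count = (n : Int) := ⟨count.toNat, (Int.toNat_of_nonneg hpos.le).symm⟩
    have hn : n ≠ 0 := by omega
    rw [PySem.List.pyRange_zero_natCast]
    rw [PySem.List.foldl_append_eq_flatMap, PySem.List.foldl_append_eq_flatMap]
    rw [slice_from_two, slice_to_two]
    simp only [List.flatMap_map, List.nil_append]
    -- the point table, as a list of 2-element lists indexed by range n
    set P : Nat → List Int := fun i =>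
      [PySem.List.pyGetD ary (2 * (i : Int)) 0, PySem.List.pyGetD ary (2 * (i : Int) + 1) 0]
      with hPdef
    have hB : (List.range n).flatMap (fun a => P a ++ P a)
        = ((List.range n).map P).flatMap (fun l => l ++ l) := by
      rw [List.flatMap_map]
    show _ = ((List.range n).flatMap (fun a => P a ++ P a)).drop 2
          ++ ((List.range n).flatMap (fun a => P a ++ P a)).take 2
    rw [hB, dup_rotate_eq_zip ((List.range n).map P)
      (by simpa [List.map_eq_nil_iff, List.range_eq_nil] using hn)
      (by intro l hl; rcases List.mem_map.mp hl with ⟨i, _, rfl⟩; simp [hPdef])]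
    rw [rot_map_range, List.zip_map', List.flatMap_map]
    apply List.flatMap_congr
    intro i hi
    simp only [hPdef]
    have hcast : ((i : Int) + 1) = ((i + 1 : Nat) : Int) := by push_cast; ring
    rw [hcast, PySem.Int.mod_natCast]
    have h1 : ((i : Int)) * 2 = (2 : Int) * (i : Int) := by ring
    have h3 : (((i + 1) % n : Nat) : Int) * 2 = (2 : Int) * (((i + 1) % n : Nat) : Int) := by ring
    rw [h1, h3]
    simp
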